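-- pv_equiv track=rewrite | github.com/ZviBaratz/brain_profile | dao.py | choose_single_anatomical
-- ===== SOURCE A (Python) =====
-- def choose_single_anatomical(scans: list):
--     choice = [
--         scan
--         for scan in scans
--         if scan.endswith("EnhancedContrast.nii.gz")
--         or scan.endswith("EnchancedContrast.nii.gz")
--     ]
--     if not choice:
--         choice = [scan for scan in scans if scan.endswith("1mm.nii.gz")]
--         if not choice:
--             return scans[0]
--         else:
--             return choice[0]
--     else:
--         return choice[0]
-- ===== SOURCE B (Python) =====
-- def choose_single_anatomical(scans: list):
--     first_1mm = None
--     for scan in scans: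
--         if scan.endswith("EnhancedContrast.nii.gz") or scan.endswith(
--             "EnchancedContrast.nii.gz"
--         ):
--             return scan
--         if first_1mm is None and scan.endswith("1mm.nii.gz"):
--             first_1mm = scan
--     if first_1mm is not None:
--         return first_1mm
--     return scans[0]
-- ===== Notes on version B (the rewrite author's own statement) =====
-- stated objective: simpler
-- what changed: Replaces A's two list-comprehension filter passes (and a possible third pass over scans) with one single for-loop that returns an enhanced-contrast scan immediately and remembers only the first 1mm scan.
import Mathlib
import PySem

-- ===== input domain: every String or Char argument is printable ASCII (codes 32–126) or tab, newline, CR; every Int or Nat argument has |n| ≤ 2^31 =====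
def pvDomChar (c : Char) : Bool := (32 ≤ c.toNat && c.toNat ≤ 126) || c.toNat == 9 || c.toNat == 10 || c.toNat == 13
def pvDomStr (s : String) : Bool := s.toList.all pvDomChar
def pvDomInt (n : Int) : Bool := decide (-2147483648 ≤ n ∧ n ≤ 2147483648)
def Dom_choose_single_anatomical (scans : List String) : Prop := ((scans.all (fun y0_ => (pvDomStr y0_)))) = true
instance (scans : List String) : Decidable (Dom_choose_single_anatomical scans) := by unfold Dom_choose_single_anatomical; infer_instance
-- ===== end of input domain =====

-- B replaces A's two filter passes with one single loop with early return; header: return-value equivalence on nonempty lists (A raises IndexError on []).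

-- ===== PORT A =====
def pvEnh (s : String) : Bool :=
  PySem.Str.endswith s "EnhancedContrast.nii.gz" || PySem.Str.endswith s "EnchancedContrast.nii.gz"

def pvMm (s : String) : Bool := PySem.Str.endswith s "1mm.nii.gz"

def choose_single_anatomical (scans : List String) : String :=
  let choice := scans.filter pvEnh
  if choice.isEmpty then
    let choice2 := scans.filter pvMm
    if choice2.isEmpty then (PySem.List.pyGet? scans 0).getD ""   -- scans[0]; none (IndexError) excluded by Pre_
    else choice2.head?.getD ""
  else choice.head?.getD ""

-- ===== PORT B =====
def pvAltGo (scans : List String) (first1mm : Option String) : Option String :=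
  match scans with
  | [] => first1mm
  | s :: rest =>
      if pvEnh s then some s
      else pvAltGo rest (if first1mm.isNone && pvMm s then some s else first1mm)

def choose_single_anatomical_alt (scans : List String) : String :=
  match pvAltGo scans none with
  | some s => s
  | none => (PySem.List.pyGet? scans 0).getD ""   -- scans[0]; none excluded by Pre_

-- ===== PRECONDITION & SPEC =====
-- A raises IndexError (scans[0]) exactly on the empty list.
def Pre_choose_single_anatomical (scans : List String) : Prop := scans ≠ []
instance (scans : List String) : Decidable (Pre_choose_single_anatomical scans) := by unfold Pre_choose_single_anatomical; infer_instance
def pvWitness_choose_single_anatomical : List String := ["a.nii.gz"]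
def Spec_choose_single_anatomical (scans : List String) (out : String) : Prop := out = choose_single_anatomical_alt scans
instance (scans : List String) (out : String) : Decidable (Spec_choose_single_anatomical scans out) := by unfold Spec_choose_single_anatomical; infer_instance

-- ===== CLAIM (what is proved, stated in full; the proofs are below) =====
def Claim_equal_choose_single_anatomical : Prop := ∀ (scans : List String), Dom_choose_single_anatomical scans → Pre_choose_single_anatomical scans → Spec_choose_single_anatomical scans (choose_single_anatomical scans)

-- ===== LEMMAS AND PROOFS =====

-- the loop of B computes: first enhanced scan if any, else acc, else first 1mm scan
theorem pvAltGo_eq (scans : List String) (acc : Option String) :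
    pvAltGo scans acc =
      match scans.filter pvEnh with
      | h :: _ => some h
      | [] => acc.or (scans.filter pvMm).head? := by
  induction scans generalizing acc with
  | nil => simp [pvAltGo]
  | cons s rest ih =>
    by_cases he : pvEnh s
    · simp [pvAltGo, he, List.filter_cons]
    · simp only [pvAltGo, he, if_neg, Bool.false_eq_true, not_false_eq_true,
        List.filter_cons, ih]
      cases hfe : rest.filter pvEnh with
      | cons h t => simp
      | nil =>
        cases acc with
        | some a => simp
        | none =>
          by_cases hm : pvMm s <;> simp [hm]

theorem choose_single_anatomical_eq (scans : List String) :
    choose_single_anatomical scans = choose_single_anatomical_alt scans := by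
  unfold choose_single_anatomical choose_single_anatomical_alt
  rw [pvAltGo_eq]
  cases hfe : scans.filter pvEnh with
  | cons h t => simp
  | nil =>
    cases hfm : scans.filter pvMm with
    | cons h t => simp
    | nil => simp

-- ===== VERDICT (by name: the statement is the Claim_ definition above) =====
theorem choose_single_anatomical_spec : Claim_equal_choose_single_anatomical := by
  intro scans _ _
  unfold Spec_choose_single_anatomical
  exact choose_single_anatomical_eq scans
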